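-- pv_equiv track=rewrite | github.com/Yokohide0317/Song2Song | prepData/downloader/parse_url.py | parse_by_song
-- ===== SOURCE A (Python) =====
-- def parse_by_song(_lines):
--
--     # 既に保存されている曲名なら、Trueを返す。
--     def is_new_song(_line):
--         # csvで、0列目に曲名が書いてある行はoriginal曲として扱う。
--         if len(_line[0].strip()) > 1:
--             return True
--         else:
--             return False
--
--     all_songs = []
--     # 一番最初は入れておく。
--     by_song = [_lines[0][0].strip(), _lines[0][1].strip()]
--
--     # 2行目からスライスする。
--     for line in _lines[1:]:
--         url = line[1].strip()
--
--         if is_new_song(line) and len(by_song) > 1: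
--             all_songs.append(by_song)
--
--             # song_name, url(original-song)
--             by_song = [line[0].strip(), url]
--         else:
--             by_song.append(url)
--
--     if len(by_song) > 1:
--         all_songs.append(by_song)
--
--     return all_songs
-- ===== SOURCE B (Python) =====
-- def parse_by_song(_lines):
--     # Single backward pass: walk the rows in reverse, collecting urls of the
--     # current group and emitting a finished group each time a boundary row
--     # (col0 longer than 1 after strip) is met; row 0 always starts a group.
--     groups = []
--     current = []
--     for line in reversed(_lines[1:]):
--         current = [line[1].strip()] + current
--         if len(line[0].strip()) > 1:
--             groups = [[line[0].strip()] + current] + groups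
--             current = []
--     return [[_lines[0][0].strip(), _lines[0][1].strip()] + current] + groups
-- ===== Notes on version B (the rewrite author's own statement) =====
-- stated objective: alternative
-- what changed: Replaces the forward accumulate-and-flush loop (with its always-true len>1 guards and the trailing flush) by a single backward pass over reversed(_lines[1:]) that prepends urls and emits each group exactly when its boundary row is reached, with row 0 closing the first group at the end.
import Mathlib
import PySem

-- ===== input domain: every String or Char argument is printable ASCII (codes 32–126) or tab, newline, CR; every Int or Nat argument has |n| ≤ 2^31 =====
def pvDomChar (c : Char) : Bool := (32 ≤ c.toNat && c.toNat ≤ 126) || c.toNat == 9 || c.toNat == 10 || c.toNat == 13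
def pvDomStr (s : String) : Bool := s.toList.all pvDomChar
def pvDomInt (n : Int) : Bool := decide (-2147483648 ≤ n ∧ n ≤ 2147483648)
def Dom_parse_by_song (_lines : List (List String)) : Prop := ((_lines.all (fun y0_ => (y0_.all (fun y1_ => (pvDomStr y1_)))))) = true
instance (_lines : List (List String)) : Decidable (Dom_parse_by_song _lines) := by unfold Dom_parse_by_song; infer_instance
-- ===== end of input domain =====

-- B replaces A's forward accumulate-and-flush loop by a single backward pass that
-- emits each group when its boundary row is reached (objective: alternative).


-- shared accessors: strip(line[0]) and strip(line[1]) (both Pythons use these)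
def pvCol0 (line : List String) : String := PySem.Str.strip (PySem.List.pyGetD line 0 "")
def pvCol1 (line : List String) : String := PySem.Str.strip (PySem.List.pyGetD line 1 "")

-- ===== PORT A =====
-- Python helper is_new_song: explicit if/else returning True/False
def pv_is_new_song (_line : List String) : Bool :=
  if 1 < PySem.Str.len (pvCol0 _line) then true else false

-- loop body of A's forward pass over _lines[1:] (state = (all_songs, by_song))
def pvA_step (st : List (List String) × List String) (line : List String) :
    List (List String) × List String :=
  let url := pvCol1 line
  if pv_is_new_song line = true ∧ 1 < st.2.length then
    (st.1 ++ [st.2], [pvCol0 line, url])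
  else
    (st.1, st.2 ++ [url])

def parse_by_song (_lines : List (List String)) : List (List String) :=
  let first := PySem.List.pyGetD _lines 0 []
  let by_song0 := [PySem.Str.strip (PySem.List.pyGetD first 0 ""),
                   PySem.Str.strip (PySem.List.pyGetD first 1 "")]
  let st := (PySem.List.slice _lines (some 1) none).foldl pvA_step ([], by_song0)
  if 1 < st.2.length then st.1 ++ [st.2] else st.1

-- ===== PORT B =====
-- loop body of B's backward pass over reversed(_lines[1:]) (state = (groups, current))
def pvB_step (line : List String) (st : List (List String) × List String) :
    List (List String) × List String :=
  let current := pvCol1 line :: st.2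
  if 1 < PySem.Str.len (pvCol0 line) then
    (([pvCol0 line] ++ current) :: st.1, [])
  else
    (st.1, current)

def parse_by_song_alt (_lines : List (List String)) : List (List String) :=
  let st := (PySem.List.slice _lines (some 1) none).reverse.foldl
      (fun st line => pvB_step line st) ([], [])
  let first := PySem.List.pyGetD _lines 0 []
  ([PySem.Str.strip (PySem.List.pyGetD first 0 ""),
    PySem.Str.strip (PySem.List.pyGetD first 1 "")] ++ st.2) :: st.1

-- ===== PRECONDITION & SPEC =====
-- A raises IndexError on empty input (_lines[0]) and on any row with fewer than
-- two columns (line[0]/line[1]); exactly those inputs are excluded.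
def Pre_parse_by_song (_lines : List (List String)) : Prop :=
  _lines ≠ [] ∧ ∀ l ∈ _lines, 2 ≤ l.length
instance (_lines : List (List String)) : Decidable (Pre_parse_by_song _lines) := by
  unfold Pre_parse_by_song; infer_instance
def pvWitness_parse_by_song : List (List String) :=
  [["Song A", "url1"], [" ", "url2"], ["Song B", "url3"]]

def Spec_parse_by_song (_lines : List (List String)) (out : List (List String)) : Prop := out = parse_by_song_alt _lines
instance (_lines : List (List String)) (out : List (List String)) : Decidable (Spec_parse_by_song _lines out) := by unfold Spec_parse_by_song; infer_instance

-- ===== CLAIM (what is proved, stated in full; the proofs are below) =====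
def Claim_equal_parse_by_song : Prop := ∀ (_lines : List (List String)), Dom_parse_by_song _lines → Pre_parse_by_song _lines → Spec_parse_by_song _lines (parse_by_song _lines)

-- ===== LEMMAS AND PROOFS =====

-- boundary test as a Bool, and the common group decomposition pvG:
-- pvG h rest = the groups of the block headed by row h followed by rows rest.
def pvNewB (line : List String) : Bool := 1 < PySem.Str.len (pvCol0 line)

def pvG (h : List String) (rest : List (List String)) : List (List String) :=
  match _hm : rest.dropWhile (fun l => !pvNewB l) with
  | [] => [pvCol0 h :: pvCol1 h :: (rest.takeWhile (fun l => !pvNewB l)).map pvCol1]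
  | h' :: t' =>
      (pvCol0 h :: pvCol1 h :: (rest.takeWhile (fun l => !pvNewB l)).map pvCol1) :: pvG h' t'
termination_by rest.length
decreasing_by
  have := List.length_dropWhile_le (fun l => !pvNewB l) rest
  rw [_hm] at this
  simp at this
  omega

def pvGtail (rest : List (List String)) : List (List String)  :=
  match rest.dropWhile (fun l => !pvNewB l) with
  | [] => []
  | h' :: t' => pvG h' t'

lemma pvG_eq (h : List String) (rest : List (List String)) :
    pvG h rest
      = (pvCol0 h :: pvCol1 h :: (rest.takeWhile (fun l => !pvNewB l)).map pvCol1)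
          :: pvGtail rest := by
  rw [pvG.eq_def]
  unfold pvGtail
  cases hd : rest.dropWhile (fun l => !pvNewB l) <;> rfl

lemma pvGtail_cons_new {l : List String} {t : List (List String)}
    (hl : pvNewB l = true) : pvGtail (l :: t) = pvG l t := by
  unfold pvGtail
  rw [List.dropWhile_cons_of_neg (by simp [hl])]

lemma pvGtail_cons_old {l : List String} {t : List (List String)}
    (hl : pvNewB l = false) : pvGtail (l :: t) = pvGtail t := by
  unfold pvGtail
  rw [List.dropWhile_cons_of_pos (by simp [hl])]

lemma pv_is_new_song_eq (l : List String) : pv_is_new_song l = pvNewB l := by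
  unfold pv_is_new_song pvNewB
  by_cases h : 1 < PySem.Str.len (pvCol0 l)
  · rw [if_pos h, decide_eq_true h]
  · rw [if_neg h, decide_eq_false h]

-- A's forward loop, generalized over the accumulators
lemma pvA_fold (rest : List (List String)) :
    ∀ all bs, 2 ≤ bs.length →
      (let st := rest.foldl pvA_step (all, bs)
       if 1 < st.2.length then st.1 ++ [st.2] else st.1)
        = all ++ (bs ++ (rest.takeWhile (fun l => !pvNewB l)).map pvCol1) :: pvGtail rest := by
  induction rest with
  | nil =>
      intro all bs hbs
      simp only [List.foldl_nil, List.takeWhile_nil, List.map_nil, List.append_nil]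
      rw [if_pos (by omega)]
      simp [pvGtail]
  | cons l t ih =>
      intro all bs hbs
      by_cases hl : pvNewB l = true
      · have hstep : pvA_step (all, bs) l = (all ++ [bs], [pvCol0 l, pvCol1 l]) := by
          simp only [pvA_step]
          rw [if_pos ⟨by rw [pv_is_new_song_eq, hl], by omega⟩]
        have hih := ih (all ++ [bs]) [pvCol0 l, pvCol1 l] (by simp)
        simp only [List.foldl_cons, hstep, hih]
        rw [pvGtail_cons_new hl, pvG_eq, List.takeWhile_cons_of_neg (by simp [hl])]
        simp
      · have hl' : pvNewB l = false := by simpa using hl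
        have hstep : pvA_step (all, bs) l = (all, bs ++ [pvCol1 l]) := by
          simp only [pvA_step]
          rw [if_neg (by simp [pv_is_new_song_eq, hl'])]
        have hih := ih all (bs ++ [pvCol1 l]) (by simp; omega)
        simp only [List.foldl_cons, hstep, hih]
        rw [pvGtail_cons_old hl', List.takeWhile_cons_of_pos (by simp [hl'])]
        simp

-- B's backward loop (as a foldr) computes (pvGtail, urls of the open first block)
lemma pvB_fold (rest : List (List String)) :
    rest.foldr pvB_step ([], [])
      = (pvGtail rest, (rest.takeWhile (fun l => !pvNewB l)).map pvCol1) := by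
  induction rest with
  | nil => simp [pvGtail]
  | cons l t ih =>
      by_cases hl : pvNewB l = true
      · have hl2 : 1 < PySem.Str.len (pvCol0 l) := by
          have := hl; unfold pvNewB at this; exact of_decide_eq_true this
        simp only [List.foldr_cons, ih, pvB_step]
        rw [if_pos hl2]
        rw [pvGtail_cons_new hl, pvG_eq, List.takeWhile_cons_of_neg (by simp [hl])]
        simp
      · have hl' : pvNewB l = false := by simpa using hl
        have hl2 : ¬ 1 < PySem.Str.len (pvCol0 l) := by
          have := hl'; unfold pvNewB at this; exact of_decide_eq_false this
        simp only [List.foldr_cons, ih, pvB_step]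
        rw [if_neg hl2]
        rw [pvGtail_cons_old hl', List.takeWhile_cons_of_pos (by simp [hl'])]
        simp

-- each port computes the head group of pvG followed by pvGtail
lemma pvA_char (h : List String) (rest : List (List String)) :
    parse_by_song (h :: rest)
      = (pvCol0 h :: pvCol1 h :: (rest.takeWhile (fun l => !pvNewB l)).map pvCol1)
          :: pvGtail rest := by
  have hA := pvA_fold rest [] [pvCol0 h, pvCol1 h] (by simp)
  simp only [List.nil_append] at hA
  unfold parse_by_song
  simp only [PySem.List.slice_from_one, List.tail_cons, PySem.List.pyGetD_zero_cons]
  exact hA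

lemma pvB_char (h : List String) (rest : List (List String)) :
    parse_by_song_alt (h :: rest)
      = (pvCol0 h :: pvCol1 h :: (rest.takeWhile (fun l => !pvNewB l)).map pvCol1)
          :: pvGtail rest := by
  unfold parse_by_song_alt
  simp only [PySem.List.slice_from_one, List.tail_cons, PySem.List.pyGetD_zero_cons,
    List.foldl_reverse]
  rw [show rest.foldr (fun x y => pvB_step x y) ([], [])
        = (pvGtail rest, (rest.takeWhile (fun l => !pvNewB l)).map pvCol1) from pvB_fold rest]
  rfl

-- ===== VERDICT (by name: the statement is the Claim_ definition above) =====
theorem parse_by_song_spec : Claim_equal_parse_by_song := by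
  intro _lines _hdom hpre
  obtain ⟨hne, -⟩ := hpre
  unfold Spec_parse_by_song
  cases _lines with
  | nil => exact absurd rfl hne
  | cons h rest => rw [pvA_char, pvB_char]
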